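-- pv_equiv track=rewrite | github.com/brassogre/ProjectLine | Geo/Grassmann_Pluecker.py | multisign
-- ===== SOURCE A (Python) =====
-- def flatten(l, ltypes=(list, tuple)):
--     """
--     Flattens the iterable l (in place if mutable)
--     For example, flatten(["first",["second","third"],[["fourth"]]])
--     returns ["first", "second", "third", "fourth"].
--     Lifted from http://rightfootin.blogspot.com/2006/09/more-on-python-flatten.html
--     """
--     ltype = type(l)
--     l = list(l)
--     i = 0
--     while i < len(l):
--         while isinstance(l[i], ltypes):
--             if not l[i]:
--                 l.pop(i)
--                 i -= 1
--                 break
--             else: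
--                 l[i:i + 1] = l[i]
--         i += 1
--     return ltype(l)
--
-- def multisign(s):
--     """For an input sequence of length n, this function returns the 2^(n-1) various sums corresponding to all
--     the possible signs (positive or negative) each member could have.
--     """
--     result = []
--     if len(s) > 0:
--         if len(s) == 1:
--             return [s[0]]
--         else:
--             firstnum = s[0]
--             r = multisign(s[1:])
--             result = flatten([[firstnum + num, -firstnum + num] for num in r])
--     return result
-- ===== SOURCE B (Python) =====
-- def multisign(s):
--     """Iterative doubling: all 2^(n-1) signed sums, same interleaved order as the recursive version."""
--     if not s:
--         return []
--     result = [s[-1]]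
--     for elem in reversed(s[:-1]):
--         result = [x for num in result for x in (elem + num, -elem + num)]
--     return result
-- ===== Notes on version B (the rewrite author's own statement) =====
-- stated objective: simpler
-- what changed: Replaces the recursion plus the generic flatten helper with an explicit right-to-left iterative doubling loop over the list.
import Mathlib
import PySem

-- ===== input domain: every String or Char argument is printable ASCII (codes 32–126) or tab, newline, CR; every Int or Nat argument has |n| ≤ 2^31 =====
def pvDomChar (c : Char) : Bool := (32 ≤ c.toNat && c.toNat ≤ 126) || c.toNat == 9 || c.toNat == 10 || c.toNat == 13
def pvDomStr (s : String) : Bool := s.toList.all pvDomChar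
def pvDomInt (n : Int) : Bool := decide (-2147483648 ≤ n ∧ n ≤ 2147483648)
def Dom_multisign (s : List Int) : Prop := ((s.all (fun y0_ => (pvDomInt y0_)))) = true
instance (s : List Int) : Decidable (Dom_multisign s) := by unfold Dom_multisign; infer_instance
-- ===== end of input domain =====

-- B replaces A's recursion-with-flatten by an explicit right-to-left iterative doubling loop (same values, same order); objective: simpler.


-- ===== PORT A =====
-- A builds [[firstnum+num, -firstnum+num] for num in r] and flattens it; on this
-- one-level-nested list of int pairs, flatten is exactly List.flatten.
def multisign (s : List Int) : List Int :=
  match s with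
  | [] => []
  | [x] => [x]
  | x :: rest =>
      ((multisign rest).map (fun num => [x + num, -x + num])).flatten

-- ===== PORT B =====
-- the loop body: result = [x for num in result for x in (elem+num, -elem+num)]
def multisignStep (result : List Int) (elem : Int) : List Int :=
  result.flatMap (fun num => [elem + num, -elem + num])

-- iterative doubling: result = [s[-1]]; for elem in reversed(s[:-1]): result = step
def multisign_alt (s : List Int) : List Int :=
  match s.getLast? with
  | none => []
  | some last => (s.dropLast.reverse).foldl multisignStep [last]

-- ===== PRECONDITION & SPEC =====
def Spec_multisign (s : List Int) (out : List Int) : Prop := out = multisign_alt s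
instance (s : List Int) (out : List Int) : Decidable (Spec_multisign s out) := by unfold Spec_multisign; infer_instance

-- ===== CLAIM (what is proved, stated in full; the proofs are below) =====
def Claim_equal_multisign : Prop := ∀ (s : List Int), Dom_multisign s → Spec_multisign s (multisign s)

-- ===== LEMMAS AND PROOFS =====

-- B's loop on x :: (y :: t) peels the head as one final step.
theorem multisign_alt_cons (x y : Int) (t : List Int) :
    multisign_alt (x :: y :: t) = multisignStep (multisign_alt (y :: t)) x := by
  cases h : (y :: t).getLast? with
  | none => simp at h
  | some last =>
      simp [multisign_alt, List.getLast?_cons_cons, h,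
            List.dropLast_cons_of_ne_nil, List.foldl_append]

theorem multisign_eq_alt (s : List Int) : multisign s = multisign_alt s := by
  induction s with
  | nil => rfl
  | cons x rest ih =>
    cases rest with
    | nil => rfl
    | cons y t =>
      rw [multisign_alt_cons, ← ih]
      simp [multisign, multisignStep, List.flatMap]

-- ===== VERDICT (by name: the statement is the Claim_ definition above) =====
theorem multisign_spec : Claim_equal_multisign := by
  intro s _
  exact multisign_eq_alt s
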